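-- pv_equiv track=rewrite | github.com/pareronia/adventofcode | 2020/AoC2020_6.py | part_1
-- ===== SOURCE A (Python) =====
-- def _append_empty_line(lst: list[str]) -> list[str]:
--     new_lst = list(lst)
--     new_lst.append("")
--     return new_lst
--
-- def _sum_of_counts(lists: list[list]) -> int:
--     return sum([len(lst) for lst in lists])
--
-- def part_1(inputs: list[str]) -> int:
--     inputs = _append_empty_line(inputs)
--     unique_anwers_per_group = []
--     unique_answers_for_group = set()
--     for input_ in inputs:
--         if len(input_) > 0:
--             unique_answers_for_group.update(input_)
--             continue
--         unique_anwers_per_group.append(unique_answers_for_group)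
--         unique_answers_for_group = set()
--     return _sum_of_counts(unique_anwers_per_group)
-- ===== SOURCE B (Python) =====
-- def part_1(inputs: list[str]) -> int:
--     total = 0
--     rest = inputs
--     while rest:
--         group = []
--         for line in rest:
--             if line == "":
--                 break
--             group.append(line)
--         chars = [c for line in group for c in line]
--         total += len(set(chars))
--         rest = rest[len(group) + 1:]
--     return total
-- ===== Notes on version B (the rewrite author's own statement) =====
-- stated objective: simpler
-- what changed: Replaces A's stateful single pass (appended empty-line sentinel, a running set flushed into a collected list of per-group sets, then summed) by a direct loop over groups: take each group's non-empty prefix, add the count of distinct characters of its concatenation, and continue on the remainder.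
import Mathlib
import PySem

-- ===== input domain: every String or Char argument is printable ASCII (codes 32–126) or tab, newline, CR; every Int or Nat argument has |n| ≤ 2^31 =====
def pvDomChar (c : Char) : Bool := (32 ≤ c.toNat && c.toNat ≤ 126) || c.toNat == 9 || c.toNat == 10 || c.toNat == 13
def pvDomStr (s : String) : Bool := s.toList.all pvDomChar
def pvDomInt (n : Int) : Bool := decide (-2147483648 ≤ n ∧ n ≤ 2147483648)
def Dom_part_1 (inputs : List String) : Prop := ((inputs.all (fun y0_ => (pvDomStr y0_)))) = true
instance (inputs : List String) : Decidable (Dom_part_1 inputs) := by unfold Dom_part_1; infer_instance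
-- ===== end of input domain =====

-- B replaces A's sentinel-flushing stateful pass by a direct recursion over groups; objective: simpler.

-- ===== PORT A =====
def appendEmptyLine (lst : List String) : List String := lst ++ [""]

def sumOfCounts (lists : List (PySem.Set Char)) : Int :=
  (lists.map (fun lst => PySem.Set.len lst)).sum

def part_1 (inputs : List String) : Int :=
  let inputs := appendEmptyLine inputs
  let st := inputs.foldl
    (fun (st : List (PySem.Set Char) × PySem.Set Char) input_ =>
      if PySem.Str.len input_ > 0 then (st.1, PySem.Set.update st.2 input_.toList)
      else (st.1 ++ [st.2], PySem.Set.empty))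
    ([], PySem.Set.empty)
  sumOfCounts st.1

-- ===== PORT B =====
-- the while loop of Source B, transcribed as well-founded recursion on the shrinking 'rest'
def altLoop : Int → List String → Int
  | total, [] => total
  | total, line :: rest0 =>
    let group := (line :: rest0).takeWhile (fun l => !(l == ""))
    let chars := group.flatMap String.toList
    altLoop (total + PySem.Set.len (PySem.Set.ofList chars))
      ((line :: rest0).drop (group.length + 1))
  termination_by _ lines => lines.length
  decreasing_by simp [List.length_drop]

def part_1_alt (inputs : List String) : Int := altLoop 0 inputs

-- ===== PRECONDITION & SPEC =====
def Spec_part_1 (inputs : List String) (out : Int) : Prop := out = part_1_alt inputs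
instance (inputs : List String) (out : Int) : Decidable (Spec_part_1 inputs out) := by unfold Spec_part_1; infer_instance

-- ===== CLAIM (what is proved, stated in full; the proofs are below) =====
def Claim_equal_part_1 : Prop := ∀ (inputs : List String), Dom_part_1 inputs → Spec_part_1 inputs (part_1 inputs)

-- ===== LEMMAS AND PROOFS =====

def altRec : List String → Int
  | [] => 0
  | line :: rest0 =>
    let group := (line :: rest0).takeWhile (fun l => !(l == ""))
    let rest := (line :: rest0).drop (group.length + 1)
    PySem.Set.len (PySem.Set.ofList (group.flatMap String.toList)) + altRec rest
  termination_by lines => lines.length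
  decreasing_by simp [List.length_drop]

theorem altLoop_eq (lines : List String) :
    ∀ total : Int, altLoop total lines = total + altRec lines := by
  induction lines using altRec.induct with
  | case1 => intro total; simp [altLoop, altRec]
  | case2 line rest0 group rest ih =>
    intro total
    rw [altLoop, altRec]
    rw [ih]
    ring

theorem altRec_eq (ls : List String) :
    altRec ls =
      PySem.Set.len (PySem.Set.ofList ((ls.takeWhile (fun l => !(l == ""))).flatMap String.toList))
        + altRec (ls.drop ((ls.takeWhile (fun l => !(l == ""))).length + 1)) := by
  cases ls with
  | nil => simp [altRec, PySem.Set.ofList, PySem.Set.len]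
  | cons a as => rw [altRec]

theorem sumOfCounts_append (acc : List (PySem.Set Char)) (s : PySem.Set Char) :
    sumOfCounts (acc ++ [s]) = sumOfCounts acc + PySem.Set.len s := by
  simp [sumOfCounts]

theorem key_lemma (lines : List String) :
    ∀ (acc : List (PySem.Set Char)) (cur : PySem.Set Char),
      sumOfCounts ((lines ++ [""]).foldl
        (fun (st : List (PySem.Set Char) × PySem.Set Char) input_ =>
          if PySem.Str.len input_ > 0 then (st.1, PySem.Set.update st.2 input_.toList)
          else (st.1 ++ [st.2], PySem.Set.empty)) (acc, cur)).1
      = sumOfCounts acc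
        + PySem.Set.len (PySem.Set.update cur ((lines.takeWhile (fun l => !(l == ""))).flatMap String.toList))
        + altRec (lines.drop ((lines.takeWhile (fun l => !(l == ""))).length + 1)) := by
  induction lines with
  | nil =>
    intro acc cur
    simp [altRec, sumOfCounts_append, PySem.Str.len, PySem.Set.update]
  | cons l ls ih =>
    intro acc cur
    by_cases h : l = ""
    · subst h
      simp only [List.cons_append, List.foldl_cons]
      have hlen : ¬ (PySem.Str.len "" > 0) := by decide
      rw [if_neg hlen]
      rw [ih (acc ++ [cur]) PySem.Set.empty]
      have htw : (("" :: ls).takeWhile (fun l => !(l == ""))) = [] := by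
        simp [List.takeWhile]
      rw [htw]
      simp only [List.flatMap_nil, List.length_nil, Nat.zero_add, List.drop_succ_cons,
        List.drop_zero]
      conv_rhs => rw [altRec_eq ls]
      simp [sumOfCounts_append, PySem.Set.update_nil_left, PySem.Set.empty]
      ring
    · simp only [List.cons_append, List.foldl_cons]
      have hlen : PySem.Str.len l > 0 := by
        have h2 : l.toList ≠ [] := by
          simpa [String.toList_eq_nil_iff] using h
        have h3 := List.length_pos_iff.mpr h2
        simp [PySem.Str.len]
        simpa using h3
      rw [if_pos hlen]
      rw [ih acc (PySem.Set.update cur l.toList)]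
      have htw : ((l :: ls).takeWhile (fun l => !(l == ""))) =
          l :: (ls.takeWhile (fun l => !(l == ""))) := by
        simp [h]
      rw [htw]
      simp [PySem.Set.update, List.foldl_append]

-- ===== VERDICT (by name: the statement is the Claim_ definition above) =====
theorem part_1_spec : Claim_equal_part_1 := by
  intro inputs _
  unfold Spec_part_1 part_1 part_1_alt appendEmptyLine
  rw [altLoop_eq inputs 0]
  rw [key_lemma inputs [] PySem.Set.empty]
  rw [altRec_eq inputs]
  simp [sumOfCounts, PySem.Set.update_nil_left, PySem.Set.empty]
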